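-- pv_equiv track=rewrite | github.com/HumanshuDG/NOC23-CS95 | Week-3/solutions.py | expanding
-- ===== SOURCE A (Python) =====
-- def expanding(l: list):
-- 	flag = True
-- 	for i in range(len(l) - 2):
-- 		prev = abs(l[i] - l[i + 1])
-- 		curr = abs(l[i + 1] - l[i + 2])
-- 		if prev < curr:
-- 			continue
-- 		else:
-- 			return False
-- 	return flag
-- ===== SOURCE B (Python) =====
-- def expanding(l: list):
--     d = [abs(a - b) for a, b in zip(l, l[1:])]
--     return d == sorted(d) and len(set(d)) == len(d)
-- ===== Notes on version B (the rewrite author's own statement) =====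
-- stated objective: alternative
-- what changed: Instead of A's scan comparing each pair of overlapping adjacent differences, B builds the difference list and characterizes strict increase as 'equals its own sorted order and has no duplicates' (sort + set-cardinality check).
import Mathlib
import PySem

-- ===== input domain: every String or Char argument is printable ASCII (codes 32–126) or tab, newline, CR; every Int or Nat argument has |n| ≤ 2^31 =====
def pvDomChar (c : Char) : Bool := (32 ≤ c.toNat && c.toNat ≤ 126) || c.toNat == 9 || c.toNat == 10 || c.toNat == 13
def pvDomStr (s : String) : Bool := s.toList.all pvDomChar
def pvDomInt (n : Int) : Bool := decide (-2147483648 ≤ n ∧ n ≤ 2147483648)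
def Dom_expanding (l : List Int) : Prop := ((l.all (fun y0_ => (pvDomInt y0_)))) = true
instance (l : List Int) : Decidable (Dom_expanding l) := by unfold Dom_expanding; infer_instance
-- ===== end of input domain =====

-- B replaces A's overlapping-differences scan by a different characterization: the
-- difference list is strictly increasing iff it equals its own sorted order and has
-- no duplicates (sort + set-cardinality check); same return value, no speed claim.

-- ===== PORT A =====
-- loop body of A over the remaining indices; early 'return False' is the 'false' branch.
-- Python's l[i] always succeeds here (every visited index is in range), so pyGetD _ _ 0 is exact on all reached indices.
def expandingGo (l : List Int) : List Int → Bool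
  | [] => true
  | i :: rest =>
      let prev := |PySem.List.pyGetD l i 0 - PySem.List.pyGetD l (i + 1) 0|
      let curr := |PySem.List.pyGetD l (i + 1) 0 - PySem.List.pyGetD l (i + 2) 0|
      if prev < curr then expandingGo l rest else false

def expanding (l : List Int) : Bool :=
  expandingGo l (PySem.List.pyRange 0 ((l.length : Int) - 2) 1)

-- ===== PORT B =====
def expanding_alt (l : List Int) : Bool :=
  let d := (l.zip (l.drop 1)).map (fun p => |p.1 - p.2|)
  decide (d = PySem.List.sorted d (fun x => x) false) && ((PySem.Set.ofList d).length == d.length)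

-- ===== PRECONDITION & SPEC =====
def Spec_expanding (l : List Int) (out : Bool) : Prop := out = expanding_alt l
instance (l : List Int) (out : Bool) : Decidable (Spec_expanding l out) := by unfold Spec_expanding; infer_instance

-- ===== CLAIM (what is proved, stated in full; the proofs are below) =====
def Claim_equal_expanding : Prop := ∀ (l : List Int), Dom_expanding l → Spec_expanding l (expanding l)

-- ===== LEMMAS AND PROOFS =====

/-- Strict-chain predicate: the list is strictly increasing step by step. -/
def chainB : List Int → Bool
  | [] => true
  | [_] => true
  | x :: y :: r => decide (x < y) && chainB (y :: r)

lemma chainB_iff (d : List Int) : chainB d = true ↔ d.Pairwise (· < ·) := by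
  induction d with
  | nil => simp [chainB]
  | cons x t ih =>
    cases t with
    | nil => simp [chainB]
    | cons y r =>
      rw [← List.isChain_iff_pairwise] at ih ⊢
      simp [chainB, List.isChain_cons_cons, ih]

lemma ofList_sublist (xs : List Int) : (PySem.Set.ofList xs).Sublist xs := by
  induction xs using List.reverseRecOn with
  | nil => simp [PySem.Set.ofList_nil]
  | append_singleton xs x ih =>
    rw [PySem.Set.ofList_append_singleton, PySem.Set.add_eq_ite]
    split
    · exact ih.trans (List.sublist_append_left xs [x])
    · exact ih.append (List.Sublist.refl [x])

lemma b_eq_chainB (d : List Int) :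
    (decide (d = PySem.List.sorted d (fun x => x) false)
      && ((PySem.Set.ofList d).length == d.length)) = chainB d := by
  rw [Bool.eq_iff_iff]
  simp only [Bool.and_eq_true, decide_eq_true_eq, beq_iff_eq, chainB_iff]
  constructor
  · rintro ⟨hs, hl⟩
    have hself : PySem.Set.ofList d = d := (ofList_sublist d).eq_of_length hl
    have hnd : d.Nodup := hself ▸ PySem.Set.nodup_ofList (xs := d)
    have hle : d.Pairwise (· ≤ ·) := by
      have := PySem.List.sorted_pairwise (xs := d) (key := fun x => x)
      rw [← hs] at this
      exact this
    exact (hle.and hnd).imp (fun h => lt_of_le_of_ne h.1 h.2)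
  · intro hp
    refine ⟨?_, ?_⟩
    · exact (PySem.List.sorted_eq_self_of_pairwise d (fun x => x)
        (hp.imp (fun h => le_of_lt h))).symm
    · exact congrArg List.length
        (PySem.Set.ofList_eq_self_of_nodup d (hp.imp (fun h => ne_of_lt h)))

/-- Difference table, structurally. -/
def dtab : List Int → List Int
  | [] => []
  | [_] => []
  | x :: y :: r => |x - y| :: dtab (y :: r)

lemma dtab_eq (l : List Int) :
    (l.zip (l.drop 1)).map (fun p : Int × Int => |p.1 - p.2|) = dtab l := by
  induction l with
  | nil => rfl
  | cons x t ih =>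
    cases t with
    | nil => rfl
    | cons y r => simp [List.zip, dtab, ← ih]

lemma range_shift (s t : Int) :
    PySem.List.pyRange (s + 1) (t + 1) 1 = (PySem.List.pyRange s t 1).map (· + 1) := by
  simp only [PySem.List.pyRange_one, List.map_map]
  have h : (t + 1 - (s + 1)) = t - s := by ring
  rw [h]
  apply List.map_congr_left
  intro k _
  simp [Function.comp]
  ring

lemma go_shift (idxs : List Int) (a : Int) (l : List Int)
    (h : ∀ i ∈ idxs, 0 ≤ i) :
    expandingGo (a :: l) (idxs.map (· + 1)) = expandingGo l idxs := by
  induction idxs with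
  | nil => rfl
  | cons i rest ih =>
    have hi : 0 ≤ i := h i (List.mem_cons_self)
    have e : ∀ j : Int, 0 ≤ j →
        PySem.List.pyGetD (a :: l) (j + 1) 0 = PySem.List.pyGetD l j 0 := by
      intro j hj
      obtain ⟨n, rfl⟩ := Int.eq_ofNat_of_zero_le hj
      have : ((n : Int) + 1) = ((n + 1 : Nat) : Int) := by push_cast; ring
      rw [this, PySem.List.pyGetD_natCast, PySem.List.pyGetD_natCast]
      rfl
    simp only [List.map_cons, expandingGo]
    have h3 : i + 1 + 2 = i + 2 + 1 := by ring
    rw [e i hi, e (i + 1) (by omega), h3, e (i + 2) (by omega)]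
    split
    · exact ih (fun j hj => h j (List.mem_cons_of_mem _ hj))
    · rfl

lemma expanding_eq_chain (l : List Int) : expanding l = chainB (dtab l) := by
  induction l with
  | nil => rfl
  | cons a t ih =>
    cases t with
    | nil => rfl
    | cons b t2 =>
      cases t2 with
      | nil => rfl
      | cons c r =>
        unfold expanding at ih ⊢
        have hlen : ((a :: b :: c :: r).length : Int) - 2 = (r.length : Int) + 1 := by
          simp; ring
        rw [hlen, PySem.List.pyRange_one_cons (by positivity)]
        have hr : PySem.List.pyRange 1 ((r.length : Int) + 1) 1 =
            (PySem.List.pyRange 0 (r.length : Int) 1).map (· + 1) := by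
          have := range_shift 0 (r.length : Int)
          simpa using this
        rw [show (0 : Int) + 1 = 1 by ring, hr]
        simp only [expandingGo]
        have g0 : PySem.List.pyGetD (a :: b :: c :: r) 0 0 = a := by simp [pysem]
        have g1 : PySem.List.pyGetD (a :: b :: c :: r) ((0:Int)+1) 0 = b := by norm_num [pysem]
        have g2 : PySem.List.pyGetD (a :: b :: c :: r) ((0:Int)+2) 0 = c := by norm_num [pysem]
        rw [g0, g1, g2]
        rw [go_shift _ _ _ (fun i hi => (PySem.List.mem_pyRange_one.mp hi).1)]
        have hlen2 : ((r.length : Int)) = ((b :: c :: r).length : Int) - 2 := by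
          simp [List.length_cons]; omega
        have hR : chainB (dtab (a :: b :: c :: r)) =
            (decide (|a - b| < |b - c|) && chainB (dtab (b :: c :: r))) := rfl
        rw [hlen2, hR, ← ih]
        by_cases h : |a - b| < |b - c| <;> simp [h]

-- ===== VERDICT (by name: the statement is the Claim_ definition above) =====
theorem expanding_spec : Claim_equal_expanding := by
  intro l _
  unfold Spec_expanding expanding_alt
  simp only [dtab_eq, b_eq_chainB]
  exact expanding_eq_chain l
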